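-- pv_equiv track=rewrite | github.com/jsuppe/loom | experiments/bakeoff/v2_driver/phG_rationale_smoke.py | make_placebo
-- ===== SOURCE A (Python) =====
-- def make_placebo(rule: str, target_length: int) -> str:
--     """Generate filler of approximately `target_length` bytes that says
--     nothing the rule itself doesn't already say. Used to control for
--     'longer reminder is more salient' confound vs the true rationale.
--     """
--     base = (
--         f"This requirement specifies the constraint above. Code that "
--         f"follows the constraint is compliant with the project's "
--         f"conventions, and code that does not follow it is "
--         f"non-compliant. The constraint applies in this scope and any "
--         f"call sites that touch this scope. "
--     )
--     out = base
--     while len(out) < target_length: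
--         out += (
--             "Compliance is determined by static inspection of the "
--             "function body and is independent of runtime behavior. "
--         )
--     return out[:target_length].rstrip() + "."
-- ===== SOURCE B (Python) =====
-- def make_placebo(rule: str, target_length: int) -> str:
--     """Closed-form re-implementation: compute how many filler chunks are
--     needed arithmetically instead of looping until the length is reached."""
--     base = (
--         "This requirement specifies the constraint above. Code that "
--         "follows the constraint is compliant with the project's "
--         "conventions, and code that does not follow it is "
--         "non-compliant. The constraint applies in this scope and any "
--         "call sites that touch this scope. "
--     )
--     chunk = (
--         "Compliance is determined by static inspection of the "
--         "function body and is independent of runtime behavior. "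
--     )
--     remaining = target_length - len(base)
--     k = 0 if remaining <= 0 else -(-remaining // len(chunk))
--     out = base + chunk * k
--     return out[:target_length].rstrip() + "."
-- ===== Notes on version B (the rewrite author's own statement) =====
-- stated objective: simpler
-- what changed: The length-driven while loop that repeatedly appends the filler chunk is replaced by a closed-form ceiling-division count of chunks followed by one string multiplication.
import Mathlib
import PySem

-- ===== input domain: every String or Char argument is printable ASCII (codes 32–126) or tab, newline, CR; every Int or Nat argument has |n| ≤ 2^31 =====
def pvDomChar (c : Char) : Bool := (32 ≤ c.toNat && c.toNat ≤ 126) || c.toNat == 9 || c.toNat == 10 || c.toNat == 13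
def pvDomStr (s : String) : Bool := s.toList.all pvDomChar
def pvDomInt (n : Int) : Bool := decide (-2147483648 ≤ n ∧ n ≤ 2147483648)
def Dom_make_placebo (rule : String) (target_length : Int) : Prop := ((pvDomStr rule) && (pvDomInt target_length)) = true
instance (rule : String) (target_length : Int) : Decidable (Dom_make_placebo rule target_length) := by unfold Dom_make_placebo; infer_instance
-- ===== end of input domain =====

-- B replaces A's append-until-long-enough while loop with a closed-form ceiling-division
-- chunk count and a single repetition (objective: simpler).

-- ===== PORT A =====
-- the `base` literal of A
def pvBase : List Char := "This requirement specifies the constraint above. Code that follows the constraint is compliant with the project's conventions, and code that does not follow it is non-compliant. The constraint applies in this scope and any call sites that touch this scope. ".toList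

-- the chunk appended inside A's while loop
def pvChunk : List Char := "Compliance is determined by static inspection of the function body and is independent of runtime behavior. ".toList

set_option maxRecDepth 4000 in
theorem pvChunk_len : pvChunk.length = 107 := by decide

-- A's while loop: while len(out) < target_length: out += chunk
def pvLoopA (out : List Char) (target_length : Int) : List Char :=
  if (out.length : Int) < target_length then pvLoopA (out ++ pvChunk) target_length
  else out
termination_by (target_length - out.length).toNat
decreasing_by
  simp only [List.length_append]
  have h : pvChunk.length = 107 := pvChunk_len
  omega

def make_placebo (rule : String) (target_length : Int) : String :=
  let out := pvLoopA pvBase target_length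
  -- return out[:target_length].rstrip() + "."
  String.ofList (PySem.Chars.rstrip (PySem.Chars.slice out none (some target_length)) ++ ['.'])

-- ===== PORT B =====
def make_placebo_alt (rule : String) (target_length : Int) : String :=
  let remaining : Int := target_length - pvBase.length
  -- k = 0 if remaining <= 0 else -(-remaining // len(chunk))
  let k : Int := if remaining ≤ 0 then 0 else -(PySem.Int.floordiv (-remaining) pvChunk.length)
  -- out = base + chunk * k
  let out := pvBase ++ (List.replicate k.toNat pvChunk).flatten
  String.ofList (PySem.Chars.rstrip (PySem.Chars.slice out none (some target_length)) ++ ['.'])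

-- ===== PRECONDITION & SPEC =====
def Spec_make_placebo (rule : String) (target_length : Int) (out : String) : Prop := out = make_placebo_alt rule target_length
instance (rule : String) (target_length : Int) (out : String) : Decidable (Spec_make_placebo rule target_length out) := by unfold Spec_make_placebo; infer_instance

-- ===== CLAIM (what is proved, stated in full; the proofs are below) =====
def Claim_equal_make_placebo : Prop := ∀ (rule : String) (target_length : Int), Dom_make_placebo rule target_length → Spec_make_placebo rule target_length (make_placebo rule target_length)

-- ===== LEMMAS AND PROOFS =====

set_option maxRecDepth 4000 in
theorem pvBase_len : pvBase.length = 257 := by decide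


-- A's loop, started at any string, appends exactly the ceiling-division number of chunks
theorem pvLoopA_closed (out : List Char) (t : Int) :
    pvLoopA out t =
      out ++ (List.replicate (if t - out.length ≤ 0 then 0 else ((t - out.length + 106).toNat) / 107) pvChunk).flatten := by
  induction out using pvLoopA.induct (target_length := t) with
  | case1 out hlt ih =>
    rw [pvLoopA, if_pos hlt, ih]
    have hlen : (out ++ pvChunk).length = out.length + 107 := by
      simp [pvChunk_len]
    rw [hlen]
    have hn : (if t - out.length ≤ 0 then 0 else ((t - out.length + 106).toNat) / 107)
        = (if t - (out.length + 107 : Nat) ≤ 0 then 0 else ((t - (out.length + 107 : Nat) + 106).toNat) / 107) + 1 := by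
      push_cast
      split_ifs <;> omega
    rw [hn, List.replicate_succ, List.flatten_cons, List.append_assoc]
  | case2 out hlt =>
    rw [pvLoopA, if_neg hlt]
    have hz : (if t - (out.length : Int) ≤ 0 then 0 else ((t - out.length + 106).toNat) / 107) = 0 := by
      split_ifs <;> omega
    rw [hz]
    simp

-- B's ceiling count equals the loop's chunk count
theorem pvCount_eq (t : Int) :
    (if t - (pvBase.length : Int) ≤ 0 then (0 : Int)
      else -(PySem.Int.floordiv (-(t - pvBase.length)) pvChunk.length)).toNat
    = (if t - (pvBase.length : Int) ≤ 0 then 0 else ((t - (pvBase.length : Int) + 106).toNat) / 107) := by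
  have hb : (pvBase.length : Int) = 257 := by rw [pvBase_len]; norm_cast
  have hc : (pvChunk.length : Int) = 107 := by rw [pvChunk_len]; norm_cast
  rw [hb, hc]
  by_cases h : t - (257 : Int) ≤ 0
  · simp [h]
  · rw [if_neg h, if_neg h,
      PySem.Int.floordiv_eq_ediv_of_pos (by omega : (0:Int) < 107)]
    omega

-- ===== VERDICT (by name: the statement is the Claim_ definition above) =====
theorem make_placebo_spec : Claim_equal_make_placebo := by
  intro rule t _
  unfold Spec_make_placebo
  simp only [make_placebo, make_placebo_alt]
  rw [pvLoopA_closed, ← pvCount_eq t]
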